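-- pv_equiv track=rewrite | github.com/duttosourav8/Optimized-Tirgn | src/history_validity_calibration.py | build_sr_history
-- ===== SOURCE A (Python) =====
-- from collections import defaultdict
-- from typing import Dict, List, Tuple
-- from collections import defaultdict
-- from typing import Dict, List, Tuple
--
-- Triple = Tuple[int, int, int, int]
--
-- def build_sr_history(triples: List[Triple]) -> Dict[Tuple[int, int], Dict[int, List[int]]]:
--     sr_hist = defaultdict(lambda: defaultdict(list))
--     for s, r, o, t in triples:
--         sr_hist[(s, r)][o].append(t)
--
--     for sr_key in sr_hist:
--         for o in sr_hist[sr_key]: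
--             sr_hist[sr_key][o].sort()
--
--     return sr_hist
-- ===== SOURCE B (Python) =====
-- def build_sr_history(triples):
--     # One global stable sort by timestamp replaces A's per-list sorting:
--     # pass 1 registers every (s, r) / o key slot in first-occurrence order,
--     # pass 2 appends timestamps in globally sorted order, so every list is
--     # already ascending and no per-group sort is needed.
--     out = {}
--     for s, r, o, _ in triples:
--         out.setdefault((s, r), {}).setdefault(o, [])
--     for s, r, o, t in sorted(triples, key=lambda x: x[3]):
--         out[(s, r)][o].append(t)
--     return out
-- ===== Notes on version B (the rewrite author's own statement) =====
-- stated objective: alternative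
-- what changed: Instead of building per-(s,r),o lists in input order and then sorting every list separately, B registers the key slots in one pass and fills them by a single pass over the whole triple list stably sorted by timestamp, so each list comes out already ascending and no per-group sort is needed.
import Mathlib
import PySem

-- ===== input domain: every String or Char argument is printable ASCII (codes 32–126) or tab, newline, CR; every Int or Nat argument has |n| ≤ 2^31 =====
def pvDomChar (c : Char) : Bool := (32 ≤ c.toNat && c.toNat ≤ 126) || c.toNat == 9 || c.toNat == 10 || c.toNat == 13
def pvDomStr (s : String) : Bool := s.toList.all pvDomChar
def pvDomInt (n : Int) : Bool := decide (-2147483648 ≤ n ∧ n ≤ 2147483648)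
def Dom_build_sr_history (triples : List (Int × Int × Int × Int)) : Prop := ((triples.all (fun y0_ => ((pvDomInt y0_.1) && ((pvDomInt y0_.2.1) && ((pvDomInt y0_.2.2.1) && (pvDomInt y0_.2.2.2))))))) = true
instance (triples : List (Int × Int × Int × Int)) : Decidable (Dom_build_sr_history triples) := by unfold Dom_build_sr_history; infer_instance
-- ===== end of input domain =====

-- B changes the strategy, not the result: one global stable sort by timestamp plus a
-- key-registration pass replace A's build-then-sort-each-group (objective: alternative).

-- ===== PORT A =====
-- sr_hist[(s, r)][o].append(t) on a defaultdict(lambda: defaultdict(list))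
def aStep (d : PySem.Dict (Int × Int) (PySem.Dict Int (List Int))) (q : Int × Int × Int × Int) :
    PySem.Dict (Int × Int) (PySem.Dict Int (List Int)) :=
  d.modify (q.1, q.2.1) PySem.Dict.empty
    (fun inner => inner.modify q.2.2.1 [] (fun ts => ts ++ [q.2.2.2]))

-- build loop, then the nested loops sorting each list in place
def build_sr_history (triples : List (Int × Int × Int × Int)) :
    List (Int × Int × List (Int × List Int)) :=
  ((triples.foldl aStep PySem.Dict.empty).items.map
    (fun p => (p.1.1, p.1.2,
      p.2.items.map (fun q => (q.1, PySem.List.sorted q.2 (fun x => x) false)))))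

-- ===== PORT B =====
-- out.setdefault((s, r), {}).setdefault(o, [])  (register the key slots; values untouched)
def bReg (d : PySem.Dict (Int × Int) (PySem.Dict Int (List Int))) (q : Int × Int × Int × Int) :
    PySem.Dict (Int × Int) (PySem.Dict Int (List Int)) :=
  d.modify (q.1, q.2.1) PySem.Dict.empty (fun inner => inner.setdefault q.2.2.1 [])

-- pass 1 over triples, then pass 2 over sorted(triples, key=lambda x: x[3]);
-- out[(s, r)][o].append(t): after pass 1 both keys are always present, so the plain
-- dict indexing is rendered total via modify (the defaults are never reached)
def build_sr_history_alt (triples : List (Int × Int × Int × Int)) :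
    List (Int × Int × List (Int × List Int)) :=
  (((PySem.List.sorted triples (fun x => x.2.2.2) false).foldl
      (fun d q => d.modify (q.1, q.2.1) PySem.Dict.empty (fun inner => inner.modify q.2.2.1 [] (fun ts => ts ++ [q.2.2.2])))
      (triples.foldl bReg PySem.Dict.empty)).items).map (fun p => (p.1.1, p.1.2, p.2.items))

-- ===== PRECONDITION & SPEC =====
def Spec_build_sr_history (triples : List (Int × Int × Int × Int)) (out : List (Int × Int × List (Int × List Int))) : Prop := out = build_sr_history_alt triples
instance (triples : List (Int × Int × Int × Int)) (out : List (Int × Int × List (Int × List Int))) : Decidable (Spec_build_sr_history triples out) := by unfold Spec_build_sr_history; infer_instance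

-- ===== CLAIM (what is proved, stated in full; the proofs are below) =====
def Claim_equal_build_sr_history : Prop := ∀ (triples : List (Int × Int × Int × Int)), Dom_build_sr_history triples → Spec_build_sr_history triples (build_sr_history triples)

-- ===== LEMMAS AND PROOFS =====

theorem outer_getD (g : (Int × Int × Int × Int) → PySem.Dict Int (List Int) → PySem.Dict Int (List Int))
    (l : List (Int × Int × Int × Int)) (d : PySem.Dict (Int × Int) (PySem.Dict Int (List Int))) (k : Int × Int) :
    ((l.foldl (fun d q => d.modify (q.1, q.2.1) PySem.Dict.empty (g q)) d).getD k PySem.Dict.empty)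
      = (l.filter (fun q => (q.1, q.2.1) == k)).foldl (fun di q => g q di) (d.getD k PySem.Dict.empty) := by
  induction l generalizing d with
  | nil => rfl
  | cons q l ih =>
    simp only [List.foldl_cons, List.filter_cons]
    rw [ih]
    by_cases h : (q.1, q.2.1) = k
    · simp [h]
    · simp [h, PySem.Dict.getD_modify, Ne.symm h]

theorem inner_app_getD (fl : List (Int × Int × Int × Int)) (di : PySem.Dict Int (List Int)) (o : Int) :
    ((fl.foldl (fun di q => di.modify q.2.2.1 [] (fun ts => ts ++ [q.2.2.2])) di).getD o [])
      = di.getD o [] ++ (fl.filter (fun q => q.2.2.1 == o)).map (fun q => q.2.2.2) := by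
  have h := PySem.Dict.getD_foldl_modify_append
    (fl.map (fun q : Int × Int × Int × Int => (q.2.2.1, q.2.2.2))) di o
  rw [List.foldl_map, List.filter_map, List.map_map] at h
  exact h

theorem inner_reg_getD (fl : List (Int × Int × Int × Int)) (di : PySem.Dict Int (List Int)) (o : Int) :
    ((fl.foldl (fun di q => di.setdefault q.2.2.1 []) di).getD o []) = di.getD o [] := by
  induction fl generalizing di with
  | nil => rfl
  | cons q fl ih =>
    simp only [List.foldl_cons]
    rw [ih]
    by_cases h : o = q.2.2.1
    · subst h; simp [PySem.Dict.getD_setdefault_self]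
    · simp [PySem.Dict.getD_eq_get?_getD, PySem.Dict.get?_setdefault_of_ne _ _ h]

theorem inner_reg_keys (fl : List (Int × Int × Int × Int)) (di : PySem.Dict Int (List Int)) :
    ((fl.foldl (fun di q => di.setdefault q.2.2.1 []) di).keys) = PySem.Set.update di.keys (fl.map (fun q => q.2.2.1)) := by
  induction fl generalizing di with
  | nil => rfl
  | cons q fl ih =>
    simp only [List.foldl_cons, List.map_cons, PySem.Set.update_cons]
    rw [ih]
    congr 1
    rw [PySem.Dict.keys_setdefault]
    show _ = if di.keys.contains q.2.2.1 = true then di.keys else di.keys ++ [q.2.2.1]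
    have : di.contains q.2.2.1 = di.keys.contains q.2.2.1 := by
      simp [PySem.Dict.contains_eq_decide_mem_keys]
    rw [this]

-- the sorted-value lemma: within one (s, r), o group, filtering the globally
-- timestamp-sorted list gives exactly the sorted timestamp list
theorem sorted_val (T : List (Int × Int × Int × Int)) (k : Int × Int) (o : Int) :
    PySem.List.sorted (((T.filter (fun q => (q.1, q.2.1) == k)).filter (fun q => q.2.2.1 == o)).map (fun q => q.2.2.2)) (fun x => x) false
      = (((PySem.List.sorted T (fun x => x.2.2.2) false).filter (fun q => (q.1, q.2.1) == k)).filter (fun q => q.2.2.1 == o)).map (fun q => q.2.2.2) := by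
  apply PySem.List.sorted_id_eq_of_perm_of_pairwise
  · exact (((PySem.List.sorted_perm T (fun x => x.2.2.2) false).filter _).filter _).map _
  · have hp := PySem.List.sorted_pairwise T (fun x => x.2.2.2)
    have hs : (((PySem.List.sorted T (fun x => x.2.2.2) false).filter (fun q => (q.1, q.2.1) == k)).filter (fun q => q.2.2.1 == o)).Sublist (PySem.List.sorted T (fun x => x.2.2.2) false) :=
      List.Sublist.trans List.filter_sublist List.filter_sublist
    exact (List.pairwise_map).2 (hp.sublist hs)

theorem main_eq (T : List (Int × Int × Int × Int)) : build_sr_history T = build_sr_history_alt T := by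
  unfold build_sr_history build_sr_history_alt
  -- abbreviations
  set S := PySem.List.sorted T (fun x => x.2.2.2) false with hS
  -- outer dict characterizations
  have hKA : (T.foldl aStep PySem.Dict.empty).keys = PySem.Set.ofList (T.map (fun q => (q.1, q.2.1))) := by
    have h := PySem.Dict.keys_foldl_modify_key T (fun q : Int × Int × Int × Int => (q.1, q.2.1)) PySem.Dict.empty
      (fun _ q => fun inner : PySem.Dict Int (List Int) => inner.modify q.2.2.1 [] (fun ts => ts ++ [q.2.2.2])) PySem.Dict.empty
    simpa [aStep, PySem.Dict.keys_empty, PySem.Set.update_nil_left] using h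
  have hNA : (T.foldl aStep PySem.Dict.empty).keys.Nodup := by
    rw [hKA]; exact PySem.Set.nodup_ofList _
  have hK1 : (T.foldl bReg PySem.Dict.empty).keys = PySem.Set.ofList (T.map (fun q => (q.1, q.2.1))) := by
    have h := PySem.Dict.keys_foldl_modify_key T (fun q : Int × Int × Int × Int => (q.1, q.2.1)) PySem.Dict.empty
      (fun _ q => fun inner : PySem.Dict Int (List Int) => inner.setdefault q.2.2.1 []) PySem.Dict.empty
    simpa [bReg, PySem.Dict.keys_empty, PySem.Set.update_nil_left] using h
  have hK2 : (S.foldl (fun d q => d.modify (q.1, q.2.1) PySem.Dict.empty (fun inner => inner.modify q.2.2.1 [] (fun ts => ts ++ [q.2.2.2]))) (T.foldl bReg PySem.Dict.empty)).keys = PySem.Set.ofList (T.map (fun q => (q.1, q.2.1))) := by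
    have h := PySem.Dict.keys_foldl_modify_key S (fun q : Int × Int × Int × Int => (q.1, q.2.1)) PySem.Dict.empty
      (fun _ q => fun inner : PySem.Dict Int (List Int) => inner.modify q.2.2.1 [] (fun ts => ts ++ [q.2.2.2])) (T.foldl bReg PySem.Dict.empty)
    rw [show (S.foldl (fun d q => d.modify (q.1, q.2.1) PySem.Dict.empty (fun inner => inner.modify q.2.2.1 [] (fun ts => ts ++ [q.2.2.2]))) (T.foldl bReg PySem.Dict.empty)) = (S.foldl (fun d x => d.modify ((fun q : Int × Int × Int × Int => (q.1, q.2.1)) x) PySem.Dict.empty ((fun _ q => fun inner : PySem.Dict Int (List Int) => inner.modify q.2.2.1 [] (fun ts => ts ++ [q.2.2.2])) d x)) (T.foldl bReg PySem.Dict.empty)) from rfl, h, hK1]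
    rw [PySem.Set.update_eq_append_filter]
    have : (PySem.Set.ofList (S.map (fun q => (q.1, q.2.1)))).filter
        (fun y => !(PySem.Set.ofList (T.map (fun q => (q.1, q.2.1)))).contains y) = [] := by
      rw [List.filter_eq_nil_iff]
      intro y hy
      rw [PySem.Set.mem_ofList] at hy
      obtain ⟨q, hq, rfl⟩ := List.mem_map.1 hy
      have hqT : q ∈ T := (PySem.List.sorted_perm T (fun x => x.2.2.2) false).mem_iff.1 hq
      have hmem : (q.1, q.2.1) ∈ PySem.Set.ofList (T.map (fun q => (q.1, q.2.1))) :=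
        (PySem.Set.mem_ofList _ _).2 (List.mem_map_of_mem hqT)
      simp [PySem.Set.contains_eq_listContains, hmem]
    rw [this, List.append_nil]
  have hN2 : (S.foldl (fun d q => d.modify (q.1, q.2.1) PySem.Dict.empty (fun inner => inner.modify q.2.2.1 [] (fun ts => ts ++ [q.2.2.2]))) (T.foldl bReg PySem.Dict.empty)).keys.Nodup := by
    rw [hK2]; exact PySem.Set.nodup_ofList _
  -- rewrite items via keys
  rw [PySem.Dict.items_eq_map_keys _ hNA PySem.Dict.empty,
      PySem.Dict.items_eq_map_keys _ hN2 PySem.Dict.empty, hKA, hK2, List.map_map, List.map_map]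
  apply List.map_congr_left
  intro k hk
  -- per-key inner dicts
  have hGA : (T.foldl aStep PySem.Dict.empty).getD k PySem.Dict.empty
      = (T.filter (fun q => (q.1, q.2.1) == k)).foldl (fun di q => di.modify q.2.2.1 [] (fun ts => ts ++ [q.2.2.2])) PySem.Dict.empty := by
    have h := outer_getD (fun q inner => inner.modify q.2.2.1 [] (fun ts => ts ++ [q.2.2.2])) T PySem.Dict.empty k
    simpa [aStep, PySem.Dict.getD_empty] using h
  have hG1 : (T.foldl bReg PySem.Dict.empty).getD k PySem.Dict.empty
      = (T.filter (fun q => (q.1, q.2.1) == k)).foldl (fun di q => di.setdefault q.2.2.1 []) PySem.Dict.empty := by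
    have h := outer_getD (fun q inner => inner.setdefault q.2.2.1 []) T PySem.Dict.empty k
    simpa [bReg, PySem.Dict.getD_empty] using h
  have hG2 : (S.foldl (fun d q => d.modify (q.1, q.2.1) PySem.Dict.empty (fun inner => inner.modify q.2.2.1 [] (fun ts => ts ++ [q.2.2.2]))) (T.foldl bReg PySem.Dict.empty)).getD k PySem.Dict.empty
      = (S.filter (fun q => (q.1, q.2.1) == k)).foldl (fun di q => di.modify q.2.2.1 [] (fun ts => ts ++ [q.2.2.2]))
          ((T.filter (fun q => (q.1, q.2.1) == k)).foldl (fun di q => di.setdefault q.2.2.1 []) (PySem.Dict.empty : PySem.Dict Int (List Int))) := by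
    have h := outer_getD (fun q inner => inner.modify q.2.2.1 [] (fun ts => ts ++ [q.2.2.2])) S (T.foldl bReg PySem.Dict.empty) k
    rw [hG1] at h
    simpa using h
  simp only [Function.comp]
  rw [hGA, hG2]
  -- inner keys
  set flk := T.filter (fun q => (q.1, q.2.1) == k) with hflk
  set sflk := S.filter (fun q => (q.1, q.2.1) == k) with hsflk
  have hIKA : (flk.foldl (fun di q => di.modify q.2.2.1 [] (fun ts => ts ++ [q.2.2.2])) PySem.Dict.empty).keys
      = PySem.Set.ofList (flk.map (fun q => q.2.2.1)) := by
    have h := PySem.Dict.keys_foldl_modify_key flk (fun q : Int × Int × Int × Int => q.2.2.1) ([] : List Int)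
      (fun _ q => fun ts : List Int => ts ++ [q.2.2.2]) PySem.Dict.empty
    simpa [PySem.Dict.keys_empty, PySem.Set.update_nil_left] using h
  have hI1K : ((flk.foldl (fun di q => di.setdefault q.2.2.1 []) (PySem.Dict.empty : PySem.Dict Int (List Int)))).keys
      = PySem.Set.ofList (flk.map (fun q => q.2.2.1)) := by
    rw [inner_reg_keys, PySem.Dict.keys_empty, PySem.Set.update_nil_left]
  have hIK2 : ((sflk.foldl (fun di q => di.modify q.2.2.1 [] (fun ts => ts ++ [q.2.2.2]))
      ((flk.foldl (fun di q => di.setdefault q.2.2.1 []) (PySem.Dict.empty : PySem.Dict Int (List Int)))))).keys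
      = PySem.Set.ofList (flk.map (fun q => q.2.2.1)) := by
    have h := PySem.Dict.keys_foldl_modify_key sflk (fun q : Int × Int × Int × Int => q.2.2.1) ([] : List Int)
      (fun _ q => fun ts : List Int => ts ++ [q.2.2.2]) ((flk.foldl (fun di q => di.setdefault q.2.2.1 []) (PySem.Dict.empty : PySem.Dict Int (List Int))))
    rw [h, hI1K, PySem.Set.update_eq_append_filter]
    have : (PySem.Set.ofList (sflk.map (fun q => q.2.2.1))).filter
        (fun y => !(PySem.Set.ofList (flk.map (fun q => q.2.2.1))).contains y) = [] := by
      rw [List.filter_eq_nil_iff]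
      intro y hy
      rw [PySem.Set.mem_ofList] at hy
      obtain ⟨q, hq, rfl⟩ := List.mem_map.1 hy
      rw [hsflk, List.mem_filter] at hq
      have hqT : q ∈ T := (PySem.List.sorted_perm T (fun x => x.2.2.2) false).mem_iff.1 hq.1
      have hqf : q ∈ flk := by rw [hflk, List.mem_filter]; exact ⟨hqT, hq.2⟩
      have hmem : q.2.2.1 ∈ PySem.Set.ofList (flk.map (fun q => q.2.2.1)) :=
        (PySem.Set.mem_ofList _ _).2 (List.mem_map_of_mem hqf)
      simp [PySem.Set.contains_eq_listContains, hmem]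
    rw [this, List.append_nil]
  have hNIA : (flk.foldl (fun di q => di.modify q.2.2.1 [] (fun ts => ts ++ [q.2.2.2])) PySem.Dict.empty).keys.Nodup := by
    rw [hIKA]; exact PySem.Set.nodup_ofList _
  have hNI2 : ((sflk.foldl (fun di q => di.modify q.2.2.1 [] (fun ts => ts ++ [q.2.2.2]))
      ((flk.foldl (fun di q => di.setdefault q.2.2.1 []) (PySem.Dict.empty : PySem.Dict Int (List Int)))))).keys.Nodup := by
    rw [hIK2]; exact PySem.Set.nodup_ofList _
  rw [PySem.Dict.items_eq_map_keys _ hNIA ([] : List Int),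
      PySem.Dict.items_eq_map_keys _ hNI2 ([] : List Int), hIKA, hIK2, List.map_map]
  refine congrArg (fun z => (k.1, k.2, z)) ?_
  apply List.map_congr_left
  intro o ho
  simp only [Function.comp]
  -- inner values
  have hVA := inner_app_getD flk PySem.Dict.empty o
  have hV1 : ((flk.foldl (fun di q => di.setdefault q.2.2.1 []) (PySem.Dict.empty : PySem.Dict Int (List Int)))).getD o [] = [] := by
    rw [inner_reg_getD, PySem.Dict.getD_empty]
  have hV2 := inner_app_getD sflk ((flk.foldl (fun di q => di.setdefault q.2.2.1 []) (PySem.Dict.empty : PySem.Dict Int (List Int)))) o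
  rw [hV1] at hV2
  simp only [PySem.Dict.getD_empty, List.nil_append] at hVA hV2
  simp only [hVA, hV2]
  rw [hflk, hsflk, hS]
  exact congrArg (fun z => (o, z)) (sorted_val T k o)

-- ===== VERDICT (by name: the statement is the Claim_ definition above) =====
theorem build_sr_history_spec : Claim_equal_build_sr_history := by
  intro triples _
  unfold Spec_build_sr_history
  exact main_eq triples
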